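-- pv_equiv track=rewrite | github.com/pauljrognon/bse-python-brushup-2022 | docs/python-solutions/python-conditionals-solution.py | equality
-- ===== SOURCE A (Python) =====
-- def equality(x, y, z):
--     ans = [-1, -1, -1]
--     if x == y:
--         if x == z:
--             ans[0], ans[1], ans[2] = "x", "y", "z"
--         else:
--             ans[0] = "x"
--             ans[1] = "y"
--     else:
--         if x == z:
--             ans[0], ans[1] = "x", "z"
--         elif y == z:
--             ans[0], ans[1] = "y", "z"
--     if ans.count(-1) == 0:
--         return "all are equal"
--     elif ans.count(-1) == 1:
--         return " and ".join([ans[i] for i in range(len(ans)) if ans[i] != -1]) + " are equal"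
--     else:
--         return "nothing is equal"
-- ===== SOURCE B (Python) =====
-- def equality(x, y, z):
--     if x == y and x == z:
--         return "all are equal"
--     if x == y:
--         return "x and y are equal"
--     if x == z:
--         return "x and z are equal"
--     if y == z:
--         return "y and z are equal"
--     return "nothing is equal"
-- ===== Notes on version B (the rewrite author's own statement) =====
-- stated objective: simpler
-- what changed: Replaced the sentinel list, count() tests and join over a comprehension with a flat chain of conditionals returning each answer string directly.
import Mathlib
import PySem

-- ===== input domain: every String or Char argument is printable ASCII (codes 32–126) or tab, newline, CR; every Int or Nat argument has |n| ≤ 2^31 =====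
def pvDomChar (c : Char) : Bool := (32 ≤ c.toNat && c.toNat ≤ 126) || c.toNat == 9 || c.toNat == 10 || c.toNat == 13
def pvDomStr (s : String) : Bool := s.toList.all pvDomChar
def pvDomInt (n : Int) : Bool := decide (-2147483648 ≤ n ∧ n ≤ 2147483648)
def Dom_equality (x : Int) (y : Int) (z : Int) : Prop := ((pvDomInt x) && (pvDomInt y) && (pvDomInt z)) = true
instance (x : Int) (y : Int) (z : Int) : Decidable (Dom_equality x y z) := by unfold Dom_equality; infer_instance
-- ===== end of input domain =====

-- B replaces A's sentinel list, count() tests and "join" machinery by a flat chain of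
-- conditionals returning each answer string directly (objective: simpler).

-- ===== PORT A =====
-- literal transliteration: ans is a List (Sum Int String) with sentinel (.inl (-1));
-- count counts sentinels, join collects the non-sentinel strings.
def pvAnsCountNeg1 (ans : List (Sum Int String)) : Nat :=
  PySem.List.count ans (Sum.inl (-1))

def pvAnsStrings (ans : List (Sum Int String)) : List String :=
  ((PySem.List.pyRange 0 (Int.ofNat ans.length) 1).filterMap fun i =>
    match PySem.List.pyGet? ans i with
    | some (Sum.inr s) => some s
    | _ => none)

def equality (x : Int) (y : Int) (z : Int) : String :=
  let ans : List (Sum Int String) := [Sum.inl (-1), Sum.inl (-1), Sum.inl (-1)]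
  let ans :=
    if x == y then
      if x == z then [Sum.inr "x", Sum.inr "y", Sum.inr "z"]
      else [Sum.inr "x", Sum.inr "y", ans[2]!]
    else
      if x == z then [Sum.inr "x", Sum.inr "z", ans[2]!]
      else if y == z then [Sum.inr "y", Sum.inr "z", ans[2]!]
      else ans
  if pvAnsCountNeg1 ans = 0 then "all are equal"
  else if pvAnsCountNeg1 ans = 1 then
    PySem.Str.join " and " (pvAnsStrings ans) ++ " are equal"
  else "nothing is equal"

-- ===== PORT B =====
def equality_alt (x : Int) (y : Int) (z : Int) : String :=
  if x == y && x == z then "all are equal"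
  else if x == y then "x and y are equal"
  else if x == z then "x and z are equal"
  else if y == z then "y and z are equal"
  else "nothing is equal"

-- ===== PRECONDITION & SPEC =====
def Spec_equality (x : Int) (y : Int) (z : Int) (out : String) : Prop := out = equality_alt x y z
instance (x : Int) (y : Int) (z : Int) (out : String) : Decidable (Spec_equality x y z out) := by unfold Spec_equality; infer_instance

-- ===== CLAIM =====
def Claim_equal_equality : Prop := ∀ (x : Int) (y : Int) (z : Int), Dom_equality x y z → Spec_equality x y z (equality x y z)

-- ===== LEMMAS AND PROOFS =====

-- ===== VERDICT =====
theorem pvBeqT {a b : Int} (h : a = b) : (a == b) = true := by simp [h]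

theorem pvBeqF {a b : Int} (h : ¬a = b) : (a == b) = false := by simp [h]

theorem equality_spec : Claim_equal_equality := by
  intro x y z _
  unfold Spec_equality equality equality_alt
  by_cases hxy : x = y <;> by_cases hxz : x = z <;> by_cases hyz : y = z
  · rw [pvBeqT hxy, pvBeqT hxz, pvBeqT hyz]; rfl
  · rw [pvBeqT hxy, pvBeqT hxz, pvBeqF hyz]; rfl
  · rw [pvBeqT hxy, pvBeqF hxz, pvBeqT hyz]; rfl
  · rw [pvBeqT hxy, pvBeqF hxz, pvBeqF hyz]; rfl
  · rw [pvBeqF hxy, pvBeqT hxz, pvBeqT hyz]; rfl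
  · rw [pvBeqF hxy, pvBeqT hxz, pvBeqF hyz]; rfl
  · rw [pvBeqF hxy, pvBeqF hxz, pvBeqT hyz]; rfl
  · rw [pvBeqF hxy, pvBeqF hxz, pvBeqF hyz]; rfl
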